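-- pv_equiv track=rewrite | github.com/protein-bioinformatics/STAMPS | cgi-bin/prepare-download.py | format_protein_seq
-- ===== SOURCE A (Python) =====
-- def format_protein_seq(seq):
--     new_seq = ""
--     cnt = 0
--     while cnt < len(seq):
--         add = min(10, len(seq) - cnt)
--         if cnt % 50 == 0:
--             new_seq += "\n        "
--         new_seq += seq[cnt : cnt + add] + " "
--         cnt += add
--     return new_seq
-- ===== SOURCE B (Python) =====
-- def _blocks(line):
--     # one 50-char line as 10-char blocks, each followed by a space
--     if not line:
--         return ""
--     return line[:10] + " " + _blocks(line[10:])
--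
-- def format_protein_seq(seq):
--     # recursive decomposition: peel one 50-char line at a time
--     if not seq:
--         return ""
--     return "\n        " + _blocks(seq[:50]) + format_protein_seq(seq[50:])
-- ===== Notes on version B (the rewrite author's own statement) =====
-- stated objective: simpler
-- what changed: Replaced the single while-loop with a counter and modulo-50 test by a recursive decomposition that peels one 50-char line (seq[:50]) per call and formats it into 10-char blocks with a recursive helper.
import Mathlib
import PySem

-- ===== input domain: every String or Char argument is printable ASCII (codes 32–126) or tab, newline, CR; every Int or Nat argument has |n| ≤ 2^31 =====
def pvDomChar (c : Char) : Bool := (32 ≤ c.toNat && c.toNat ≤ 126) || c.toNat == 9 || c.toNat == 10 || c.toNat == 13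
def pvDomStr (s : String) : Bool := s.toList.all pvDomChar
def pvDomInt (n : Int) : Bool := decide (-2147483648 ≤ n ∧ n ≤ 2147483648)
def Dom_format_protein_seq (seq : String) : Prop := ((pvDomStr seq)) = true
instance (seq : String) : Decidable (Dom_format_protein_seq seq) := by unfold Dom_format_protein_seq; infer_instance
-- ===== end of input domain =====

-- B replaces A's single while-loop with a counter and modulo-50 test by a recursive
-- decomposition peeling one 50-char line per call (objective: simpler).

-- ===== PORT A =====
-- A's while-loop: cnt and the accumulated string new_seq are the loop state.
-- seq[cnt : cnt + add] with 0 ≤ cnt and add = min 10 (len - cnt) is exactly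
-- (seq.drop cnt).take add (both slice bounds are nonnegative and in range).
def formatGoA (seq : List Char) (cnt : Nat) (new_seq : List Char) : List Char :=
  if h : cnt < seq.length then
    formatGoA seq (cnt + min 10 (seq.length - cnt))
      ((if cnt % 50 = 0 then new_seq ++ "\n        ".toList else new_seq)
        ++ (seq.drop cnt).take (min 10 (seq.length - cnt)) ++ [' '])
  else new_seq
termination_by seq.length - cnt
decreasing_by omega

def format_protein_seq (seq : String) : String :=
  String.mk (formatGoA seq.toList 0 [])

-- ===== PORT B =====
-- _blocks from Source B
def blkChars (line : List Char) : List Char :=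
  if line = [] then [] else line.take 10 ++ ' ' :: blkChars (line.drop 10)
termination_by line.length
decreasing_by
  rename_i h
  have := List.length_pos_of_ne_nil h
  simp only [List.length_drop]
  omega

-- recursive body of Source B's format_protein_seq
def altChars (s : List Char) : List Char :=
  if s = [] then [] else "\n        ".toList ++ blkChars (s.take 50) ++ altChars (s.drop 50)
termination_by s.length
decreasing_by
  rename_i h
  have := List.length_pos_of_ne_nil h
  simp only [List.length_drop]
  omega

def format_protein_seq_alt (seq : String) : String :=
  String.mk (altChars seq.toList)

-- ===== PRECONDITION & SPEC =====
def Spec_format_protein_seq (seq : String) (out : String) : Prop := out = format_protein_seq_alt seq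
instance (seq : String) (out : String) : Decidable (Spec_format_protein_seq seq out) := by unfold Spec_format_protein_seq; infer_instance

-- ===== CLAIM (what is proved, stated in full; the proofs are below) =====
def Claim_equal_format_protein_seq : Prop := ∀ (seq : String), Dom_format_protein_seq seq → Spec_format_protein_seq seq (format_protein_seq seq)

-- ===== LEMMAS AND PROOFS =====

-- F l p: what A's loop still produces when the rest of the sequence is l and the
-- current position within the 50-char line is p (p = cnt % 50, a multiple of 10).
def pvF (l : List Char) (p : Nat) : List Char :=
  if l = [] then []
  else (if p = 0 then "\n        ".toList else [])
         ++ blkChars (l.take (50 - p)) ++ altChars (l.drop (50 - p))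

theorem blkChars_nil : blkChars [] = [] := by rw [blkChars]; simp

theorem blkChars_cons (l : List Char) (h : l ≠ []) :
    blkChars l = l.take 10 ++ ' ' :: blkChars (l.drop 10) := by
  rw [blkChars, if_neg h]

theorem altChars_nil : altChars [] = [] := by rw [altChars]; simp

theorem pvF_zero (l : List Char) : pvF l 0 = altChars l := by
  by_cases h : l = []
  · simp [pvF, altChars, h]
  · rw [pvF, if_neg h]
    conv_rhs => rw [altChars, if_neg h]
    norm_num

theorem pvF_pos (m : List Char) (q : Nat) (hq : q ≠ 0) :
    blkChars (m.take (50 - q)) ++ altChars (m.drop (50 - q)) = pvF m q := by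
  by_cases h : m = []
  · subst h; simp [pvF, blkChars_nil, altChars_nil]
  · rw [pvF, if_neg h]; simp [hq]

theorem formatGoA_eq (k : Nat) : ∀ (seq : List Char) (cnt : Nat) (acc : List Char),
    cnt % 10 = 0 → seq.length - cnt ≤ k →
    formatGoA seq cnt acc = acc ++ pvF (seq.drop cnt) (cnt % 50) := by
  induction k with
  | zero =>
    intro seq cnt acc _ hk
    have h : ¬ cnt < seq.length := by omega
    rw [formatGoA, dif_neg h]
    have : seq.drop cnt = [] := List.drop_eq_nil_of_le (by omega)
    simp [this, pvF]
  | succ k ih =>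
    intro seq cnt acc h10 hk
    by_cases h : cnt < seq.length
    · set l := seq.drop cnt with hl
      have hlen : l.length = seq.length - cnt := by simp [hl]
      have hlne : l ≠ [] := by
        intro he; rw [he] at hlen; simp at hlen; omega
      have hp50 : cnt % 50 % 10 = 0 := by omega
      have hple : cnt % 50 ≤ 40 := by omega
      rw [formatGoA, dif_pos h]
      by_cases hbig : 10 ≤ seq.length - cnt
      · -- a full block of 10 is taken
        have hmin : min 10 (seq.length - cnt) = 10 := by omega
        rw [hmin, ih seq (cnt + 10) _ (by omega) (by omega)]
        have hdd : seq.drop (cnt + 10) = l.drop 10 := by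
          rw [hl, List.drop_drop]
        rw [hdd]
        -- unfold one block of pvF on the left
        have htne : l.take (50 - cnt % 50) ≠ [] := by
          intro he
          have hle := congrArg List.length he
          rw [List.length_take] at hle
          simp only [List.length_nil] at hle
          omega
        have hblk : blkChars (l.take (50 - cnt % 50))
            = l.take 10 ++ ' ' :: blkChars ((l.drop 10).take (40 - cnt % 50)) := by
          rw [blkChars_cons _ htne, List.take_take, List.drop_take]
          have h1 : min 10 (50 - cnt % 50) = 10 := by omega
          have h2 : 50 - cnt % 50 - 10 = 40 - cnt % 50 := by omega
          rw [h1, h2]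
        have hdr : l.drop (50 - cnt % 50) = (l.drop 10).drop (40 - cnt % 50) := by
          have hnum : 50 - cnt % 50 = 10 + (40 - cnt % 50) := by omega
          conv_rhs => rw [List.drop_drop]
          rw [hnum]
        by_cases h40 : cnt % 50 = 40
        · have hq : (cnt + 10) % 50 = 0 := by omega
          rw [hq, pvF_zero, pvF, if_neg hlne, hblk, hdr, h40]
          rw [← hl]
          simp [blkChars_nil]
        · have hq : (cnt + 10) % 50 = cnt % 50 + 10 := by omega
          rw [hq, ← pvF_pos (l.drop 10) (cnt % 50 + 10) (by omega)]
          rw [pvF, if_neg hlne, hblk, hdr]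
          have h3 : 50 - (cnt % 50 + 10) = 40 - cnt % 50 := by omega
          rw [h3, ← hl]
          split <;> simp
      · -- final partial block: loop terminates after this iteration
        have hmin : min 10 (seq.length - cnt) = seq.length - cnt := by omega
        rw [hmin]
        have hstop : ¬ cnt + (seq.length - cnt) < seq.length := by omega
        rw [formatGoA, dif_neg hstop]
        have htfull : l.take (seq.length - cnt) = l := by
          apply List.take_of_length_le; omega
        have hshort : l.length < 10 := by omega
        rw [pvF, if_neg hlne]
        have ht50 : l.take (50 - cnt % 50) = l := List.take_of_length_le (by omega)
        have hd50 : l.drop (50 - cnt % 50) = [] := List.drop_eq_nil_of_le (by omega)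
        rw [ht50, hd50]
        have hblk : blkChars l = l ++ [' '] := by
          rw [blkChars_cons _ hlne]
          have h1 : l.take 10 = l := List.take_of_length_le (by omega)
          have hd : l.drop 10 = [] := List.drop_eq_nil_of_le (by omega)
          rw [h1, hd, blkChars_nil]
        rw [hblk, htfull, altChars_nil]
        split <;> simp
    · rw [formatGoA, dif_neg h]
      have : seq.drop cnt = [] := List.drop_eq_nil_of_le (by omega)
      simp [this, pvF]

-- ===== VERDICT (by name: the statement is the Claim_ definition above) =====
theorem format_protein_seq_spec : Claim_equal_format_protein_seq := by
  intro seq _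
  unfold Spec_format_protein_seq format_protein_seq format_protein_seq_alt
  rw [formatGoA_eq seq.toList.length seq.toList 0 [] (by omega) (by omega)]
  simp [pvF_zero]
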